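-- pv_equiv track=rewrite | github.com/rajiv256/NeuralCRNGen | main.py | _get_indices_from_dims
-- ===== SOURCE A (Python) =====
-- import itertools
--
-- def _get_indices_from_dims(dims=[]):
--     assert len(dims) <= 2
--
--     # Used for Ep, Em etc.,
--     if len(dims) == 0:
--         return ['']
--
--     if len(dims) == 1:
--         d1 = dims[0]
--         indices = [str(x) for x in range(1, d1 + 1)]
--     if len(dims) == 2:
--         d1 = dims[0]
--         d2 = dims[1]
--         pair_indices = list(itertools.product(range(1, d1+1), range(1, d2+1)))
--         indices = [str(x) + str(y) for x, y in pair_indices]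
--     return indices
-- ===== SOURCE B (Python) =====
-- def _get_indices_from_dims(dims=[]):
--     assert len(dims) <= 2
--     acc = ['']
--     for d in dims:
--         acc = [prefix + str(x) for prefix in acc for x in range(1, d + 1)]
--     return acc
-- ===== Notes on version B (the rewrite author's own statement) =====
-- stated objective: simpler
-- what changed: Replaced the length-dispatch (0/1/2 special cases with itertools.product) by a single fold over dims that extends an accumulator of prefixes, unifying all cases.
import Mathlib
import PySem

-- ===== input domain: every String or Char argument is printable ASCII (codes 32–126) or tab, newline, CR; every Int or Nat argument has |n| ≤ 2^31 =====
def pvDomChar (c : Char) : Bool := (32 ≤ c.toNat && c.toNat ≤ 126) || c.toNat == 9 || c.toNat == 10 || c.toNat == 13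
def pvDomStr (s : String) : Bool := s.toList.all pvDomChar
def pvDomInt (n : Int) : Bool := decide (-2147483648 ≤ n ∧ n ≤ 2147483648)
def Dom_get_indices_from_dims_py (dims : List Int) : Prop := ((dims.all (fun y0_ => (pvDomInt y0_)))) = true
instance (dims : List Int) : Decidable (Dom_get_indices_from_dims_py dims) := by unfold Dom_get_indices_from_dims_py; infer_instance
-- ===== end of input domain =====

-- B replaces A's 0/1/2-length dispatch (with itertools.product) by one fold over dims
-- extending a list of prefixes; objective: simpler. A raises AssertionError when len(dims) > 2
-- (excluded by Pre_).

-- ===== PORT A =====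
def get_indices_from_dims_py (dims : List Int) : List String :=
  -- assert len(dims) <= 2 raises outside Pre_; value there is irrelevant
  if dims.length = 0 then [""]
  else if dims.length = 1 then
    let d1 := (PySem.List.pyGet? dims 0).getD 0
    (PySem.List.pyRange 1 (d1 + 1) 1).map PySem.Int.toStr
  else if dims.length = 2 then
    let d1 := (PySem.List.pyGet? dims 0).getD 0
    let d2 := (PySem.List.pyGet? dims 1).getD 0
    let pair_indices := (PySem.List.pyRange 1 (d1 + 1) 1).flatMap
      (fun x => (PySem.List.pyRange 1 (d2 + 1) 1).map (fun y => (x, y)))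
    pair_indices.map (fun p => PySem.Int.toStr p.1 ++ PySem.Int.toStr p.2)
  else []

-- ===== PORT B =====
def get_indices_from_dims_py_alt (dims : List Int) : List String :=
  dims.foldl (fun acc d =>
    acc.flatMap (fun prefix_ =>
      (PySem.List.pyRange 1 (d + 1) 1).map (fun x => prefix_ ++ PySem.Int.toStr x))) [""]

-- ===== PRECONDITION & SPEC =====
-- Pre_ excludes exactly the inputs on which A's assert raises (len(dims) > 2).
def Pre_get_indices_from_dims_py (dims : List Int) : Prop := dims.length ≤ 2
instance (dims : List Int) : Decidable (Pre_get_indices_from_dims_py dims) := by unfold Pre_get_indices_from_dims_py; infer_instance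
def pvWitness_get_indices_from_dims_py : List Int := [2, 3]

def Spec_get_indices_from_dims_py (dims : List Int) (out : List String) : Prop := out = get_indices_from_dims_py_alt dims
instance (dims : List Int) (out : List String) : Decidable (Spec_get_indices_from_dims_py dims out) := by unfold Spec_get_indices_from_dims_py; infer_instance

-- ===== CLAIM (what is proved, stated in full; the proofs are below) =====
def Claim_equal_get_indices_from_dims_py : Prop := ∀ (dims : List Int), Dom_get_indices_from_dims_py dims → Pre_get_indices_from_dims_py dims → Spec_get_indices_from_dims_py dims (get_indices_from_dims_py dims)

-- ===== LEMMAS AND PROOFS =====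

-- ===== VERDICT (by name: the statement is the Claim_ definition above) =====
theorem get_indices_from_dims_py_spec : Claim_equal_get_indices_from_dims_py := by
  intro dims _ hpre
  unfold Spec_get_indices_from_dims_py
  match dims, hpre with
  | [], _ => rfl
  | [a], _ =>
    simp [get_indices_from_dims_py, get_indices_from_dims_py_alt, PySem.List.pyGet?,
      PySem.List.pyIdx?, List.flatMap]
  | [a, b], _ =>
    simp [get_indices_from_dims_py, get_indices_from_dims_py_alt, PySem.List.pyGet?,
      PySem.List.pyIdx?, List.flatMap]
    congr 1
    apply List.map_congr_left
    intro x _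
    simp [List.map_map]
  | _ :: _ :: _ :: _, h => simp [Pre_get_indices_from_dims_py] at h
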